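-- pv_equiv track=rewrite | github.com/hyukkyukang/raquel_anon | src/aligned_db/nullified_db.py | _group_deletion_plan
-- ===== SOURCE A (Python) =====
-- from typing import Any, Dict, List, Optional, Set, Tuple
--
-- def _group_deletion_plan(
--     deletion_plan: List[Tuple[str, str, str]],
-- ) -> List[Tuple[str, str, List[str]]]:
--     """Group deletion operations by table and natural-key column."""
--     grouped: Dict[Tuple[str, str], List[str]] = {}
--     ordered_keys: List[Tuple[str, str]] = []
--
--     for table_name, column_name, value in deletion_plan:
--         key = (table_name, column_name)
--         if key not in grouped:
--             grouped[key] = []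
--             ordered_keys.append(key)
--         grouped[key].append(value)
--
--     result: List[Tuple[str, str, List[str]]] = []
--     for key in ordered_keys:
--         deduplicated_values = list(dict.fromkeys(grouped[key]))
--         result.append((key[0], key[1], deduplicated_values))
--     return result
-- ===== SOURCE B (Python) =====
-- def _group_deletion_plan(deletion_plan):
--     """Group deletion operations by table and natural-key column."""
--     result = []
--     for table, column, _ in deletion_plan:
--         if any(t == table and c == column for t, c, _ in result):
--             continue  # this (table, column) group was already emitted
--         values = []
--         for t, c, v in deletion_plan:
--             if t == table and c == column and v not in values:
--                 values.append(v)
--         result.append((table, column, values))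
--     return result
-- ===== Notes on version B (the rewrite author's own statement) =====
-- stated objective: alternative
-- what changed: Dict-free nested-scan algorithm: for each first occurrence of a (table, column) key, re-scan the whole plan collecting its values with dedup-at-insert into the output group, instead of A's hash-grouping pass plus a separate dict.fromkeys dedup pass; trades A's O(n) hashing for O(n*k) scans.
import Mathlib
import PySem

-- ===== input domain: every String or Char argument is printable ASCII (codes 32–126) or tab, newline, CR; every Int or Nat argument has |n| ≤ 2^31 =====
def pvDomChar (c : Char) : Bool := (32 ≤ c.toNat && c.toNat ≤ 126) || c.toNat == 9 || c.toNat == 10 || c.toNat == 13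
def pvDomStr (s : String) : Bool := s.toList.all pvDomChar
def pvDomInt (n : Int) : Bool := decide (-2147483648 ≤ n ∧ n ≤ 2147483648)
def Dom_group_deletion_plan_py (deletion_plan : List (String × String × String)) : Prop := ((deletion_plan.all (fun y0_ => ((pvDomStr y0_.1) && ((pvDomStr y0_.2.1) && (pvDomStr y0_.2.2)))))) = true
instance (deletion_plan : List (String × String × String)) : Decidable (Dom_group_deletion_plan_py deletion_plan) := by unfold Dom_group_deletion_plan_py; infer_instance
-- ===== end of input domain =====

-- B is a dict-free nested-scan alternative: at each first occurrence of a (table, column)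
-- key it re-scans the whole plan collecting that key's values with dedup-at-insert,
-- instead of A's dict grouping pass plus a separate dedup pass; objective: alternative.


-- ===== PORT A =====
def group_deletion_plan_py (deletion_plan : List (String × String × String)) : List (String × String × List String) :=
  -- grouped : dict, ordered_keys : list; then dedup each group with dict.fromkeys
  let st := deletion_plan.foldl
    (fun (st : PySem.Dict (String × String) (List String) × List (String × String)) t =>
      let key := (t.1, t.2.1)
      let st := if st.1.contains key then st else (st.1.insert key [], st.2 ++ [key])
      (st.1.insert key (st.1.getD key [] ++ [t.2.2]), st.2))
    (PySem.Dict.empty, [])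
  st.2.map (fun k => (k.1, k.2, PySem.List.dedup (st.1.getD k [])))

-- ===== PORT B =====
-- inner loop: for t, c, v in deletion_plan: if t == table and c == column and v not in values: values.append(v)
def pvGather (deletion_plan : List (String × String × String)) (table column : String) : List String :=
  deletion_plan.foldl
    (fun values u =>
      if u.1 == table && (u.2.1 == column && !(values.contains u.2.2)) then values ++ [u.2.2]
      else values) []

def group_deletion_plan_py_alt (deletion_plan : List (String × String × String)) : List (String × String × List String) :=
  deletion_plan.foldl
    (fun result t =>
      if result.any (fun g => g.1 == t.1 && g.2.1 == t.2.1) then result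
      else result ++ [(t.1, t.2.1, pvGather deletion_plan t.1 t.2.1)]) []

-- ===== PRECONDITION & SPEC =====
def Spec_group_deletion_plan_py (deletion_plan : List (String × String × String)) (out : List (String × String × List String)) : Prop := out = group_deletion_plan_py_alt deletion_plan
instance (deletion_plan : List (String × String × String)) (out : List (String × String × List String)) : Decidable (Spec_group_deletion_plan_py deletion_plan out) := by unfold Spec_group_deletion_plan_py; infer_instance

-- ===== CLAIM (what is proved, stated in full; the proofs are below) =====
def Claim_equal_group_deletion_plan_py : Prop := ∀ (deletion_plan : List (String × String × String)), Dom_group_deletion_plan_py deletion_plan → Spec_group_deletion_plan_py deletion_plan (group_deletion_plan_py deletion_plan)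

-- ===== LEMMAS AND PROOFS =====

-- A's loop state equals the plain modify-fold together with its key list.
theorem pv_A_state (l : List (String × String × String))
    (g : PySem.Dict (String × String) (List String)) (ord : List (String × String))
    (hord : ord = g.keys) :
    l.foldl
      (fun (st : PySem.Dict (String × String) (List String) × List (String × String)) t =>
        let key := (t.1, t.2.1)
        let st := if st.1.contains key then st else (st.1.insert key [], st.2 ++ [key])
        (st.1.insert key (st.1.getD key [] ++ [t.2.2]), st.2)) (g, ord)
    = (let g' := l.foldl (fun d t => d.modify (t.1, t.2.1) [] (· ++ [t.2.2])) g
       (g', g'.keys)) := by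
  induction l generalizing g ord with
  | nil => simp only [List.foldl_nil]; rw [hord]
  | cons t rest ih =>
    simp only [List.foldl_cons]
    by_cases h : g.contains (t.1, t.2.1) = true
    · rw [show (if g.contains (t.1, t.2.1) then (g, ord) else (g.insert (t.1, t.2.1) [], ord ++ [(t.1, t.2.1)])) = (g, ord) from by simp [h]]
      refine ih _ _ ?_
      show ord = (g.insert (t.1, t.2.1) (g.getD (t.1, t.2.1) [] ++ [t.2.2])).keys
      rw [PySem.Dict.keys_insert_of_contains _ _ h, hord]
    · rw [show (if g.contains (t.1, t.2.1) then (g, ord) else (g.insert (t.1, t.2.1) [], ord ++ [(t.1, t.2.1)])) = (g.insert (t.1, t.2.1) [], ord ++ [(t.1, t.2.1)]) from by simp [h]]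
      have hcf : g.contains (t.1, t.2.1) = false := by simpa using h
      have hstep : (g.insert (t.1, t.2.1) []).insert (t.1, t.2.1)
            ((g.insert (t.1, t.2.1) []).getD (t.1, t.2.1) [] ++ [t.2.2])
          = g.modify (t.1, t.2.1) [] (· ++ [t.2.2]) := by
        rw [PySem.Dict.getD_insert_self, PySem.Dict.insert_insert_self,
          show g.modify (t.1, t.2.1) [] (· ++ [t.2.2]) = g.insert (t.1, t.2.1) (g.getD (t.1, t.2.1) [] ++ [t.2.2]) from rfl,
          PySem.Dict.getD_of_not_contains _ _ hcf]
      rw [hstep]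
      refine ih _ _ ?_
      show ord ++ [(t.1, t.2.1)] = (g.modify (t.1, t.2.1) [] (· ++ [t.2.2])).keys
      rw [hord, show g.modify (t.1, t.2.1) [] (· ++ [t.2.2]) = g.insert (t.1, t.2.1) (g.getD (t.1, t.2.1) [] ++ [t.2.2]) from rfl,
        PySem.Dict.keys_insert_of_not_contains _ _ hcf]

-- B's inner loop is the ordered dedup of the values whose key matches.
theorem pv_gather_gen (l : List (String × String × String)) (a b : String) (acc : List String) :
    l.foldl
      (fun values u =>
        if u.1 == a && (u.2.1 == b && !(values.contains u.2.2)) then values ++ [u.2.2]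
        else values) acc
    = ((l.filter (fun u => (u.1, u.2.1) == (a, b))).map (·.2.2)).foldl PySem.Set.add acc := by
  induction l generalizing acc with
  | nil => rfl
  | cons u rest ih =>
    simp only [List.foldl_cons, List.filter_cons]
    by_cases h : (u.1, u.2.1) = (a, b)
    · have h1 : u.1 = a := congrArg Prod.fst h
      have h2 : u.2.1 = b := congrArg Prod.snd h
      rw [show ((u.1, u.2.1) == (a, b)) = true from by simp [h]]
      simp only [if_pos, List.map_cons, List.foldl_cons]
      have hstep : (if u.1 == a && (u.2.1 == b && !(acc.contains u.2.2)) then acc ++ [u.2.2] else acc)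
          = PySem.Set.add acc u.2.2 := by
        simp only [h1, h2, beq_self_eq_true, Bool.true_and, PySem.Set.add]
        cases hc : acc.contains u.2.2 <;> simp_all
      rw [hstep, ih]
    · rw [show ((u.1, u.2.1) == (a, b)) = false from by simpa using h]
      simp only [Bool.false_eq_true, if_false]
      have hne : (u.1 == a && (u.2.1 == b && !(acc.contains u.2.2))) = false := by
        by_cases h1 : u.1 = a
        · by_cases h2 : u.2.1 = b
          · exact absurd (by rw [h1, h2]) h
          · simp [h2]
        · simp [h1]
      rw [hne]
      simp only [Bool.false_eq_true, if_false]
      exact ih acc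

theorem pv_gather (plan : List (String × String × String)) (a b : String) :
    pvGather plan a b
    = PySem.List.dedup ((plan.filter (fun u => (u.1, u.2.1) == (a, b))).map (·.2.2)) := by
  rw [pvGather, pv_gather_gen, PySem.List.dedup_eq_ofList, PySem.Set.ofList_eq_foldl]

-- the membership test over the accumulated groups is a key lookup
theorem pv_any_map (ks : List (String × String)) (g : String × String → List String)
    (a b : String) :
    ((ks.map (fun k => (k.1, k.2, g k))).any (fun p => p.1 == a && p.2.1 == b))
    = ks.contains (a, b) := by
  induction ks with
  | nil => rfl
  | cons k rest ih =>
    simp only [List.map_cons, List.any_cons, ih, List.contains_cons]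
    rcases k with ⟨k1, k2⟩
    rw [Bool.eq_iff_iff]
    simp only [Bool.or_eq_true, Bool.and_eq_true, beq_iff_eq, Prod.mk.injEq]
    constructor
    · rintro (⟨h1, h2⟩ | hm)
      · exact Or.inl ⟨h1.symm, h2.symm⟩
      · exact Or.inr hm
    · rintro (⟨h1, h2⟩ | hm)
      · exact Or.inl ⟨h1.symm, h2.symm⟩
      · exact Or.inr hm

-- B's outer loop accumulates the first-occurrence keys, mapped through a fixed group maker.
theorem pv_B_inv (l : List (String × String × String)) (plan : List (String × String × String))
    (ks : List (String × String)) :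
    l.foldl
      (fun result t =>
        if result.any (fun g => g.1 == t.1 && g.2.1 == t.2.1) then result
        else result ++ [(t.1, t.2.1, pvGather plan t.1 t.2.1)])
      (ks.map (fun k => (k.1, k.2, pvGather plan k.1 k.2)))
    = (PySem.Set.update ks (l.map (fun t => (t.1, t.2.1)))).map
        (fun k => (k.1, k.2, pvGather plan k.1 k.2)) := by
  induction l generalizing ks with
  | nil => rfl
  | cons t rest ih =>
    simp only [List.foldl_cons, List.map_cons]
    rw [pv_any_map ks (fun k => pvGather plan k.1 k.2) t.1 t.2.1]
    have hupd : PySem.Set.update ks ((t.1, t.2.1) :: rest.map (fun t => (t.1, t.2.1)))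
        = PySem.Set.update (PySem.Set.add ks (t.1, t.2.1)) (rest.map (fun t => (t.1, t.2.1))) := rfl
    rw [hupd]
    by_cases h : ks.contains (t.1, t.2.1) = true
    · have hm : (t.1, t.2.1) ∈ ks := by simpa using h
      rw [show PySem.Set.add ks (t.1, t.2.1) = ks from by simp [PySem.Set.add, hm]]
      simp only [h, if_pos]
      exact ih ks
    · have hcf : ks.contains (t.1, t.2.1) = false := by simpa using h
      have hm : (t.1, t.2.1) ∉ ks := by simpa using hcf
      rw [show PySem.Set.add ks (t.1, t.2.1) = ks ++ [(t.1, t.2.1)] from by simp [PySem.Set.add, hm]]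
      simp only [hcf, Bool.false_eq_true, if_false]
      rw [show ks.map (fun k => (k.1, k.2, pvGather plan k.1 k.2)) ++ [(t.1, t.2.1, pvGather plan t.1 t.2.1)]
          = (ks ++ [(t.1, t.2.1)]).map (fun k => (k.1, k.2, pvGather plan k.1 k.2)) from by simp]
      exact ih (ks ++ [(t.1, t.2.1)])

-- ===== VERDICT (by name: the statement is the Claim_ definition above) =====
theorem group_deletion_plan_py_spec : Claim_equal_group_deletion_plan_py := by
  intro plan _
  unfold Spec_group_deletion_plan_py group_deletion_plan_py group_deletion_plan_py_alt
  rw [pv_A_state plan PySem.Dict.empty [] (by simp [PySem.Dict.keys_empty])]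
  simp only
  -- B side: the outer fold from [] is the fold from [].map …
  have hB := pv_B_inv plan plan []
  simp only [List.map_nil] at hB
  rw [hB]
  -- A side: characterize keys and group contents of the modify-fold
  have hmapA : plan.foldl (fun d t => d.modify (t.1, t.2.1) [] (· ++ [t.2.2])) PySem.Dict.empty
      = (plan.map (fun t => ((t.1, t.2.1), t.2.2))).foldl (fun d p => d.modify p.1 [] (· ++ [p.2])) PySem.Dict.empty := by
    rw [List.foldl_map]
  rw [hmapA]
  set prs := plan.map (fun t => ((t.1, t.2.1), t.2.2)) with hprs
  set gA := prs.foldl (fun d p => d.modify p.1 [] (· ++ [p.2])) PySem.Dict.empty with hgA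
  have hkeys : gA.keys = PySem.Set.update ([] : List (String × String)) (plan.map (fun t => (t.1, t.2.1))) := by
    rw [hgA, PySem.Dict.keys_foldl_modify_key prs Prod.fst [] (fun d p v => v ++ [p.2]) PySem.Dict.empty,
      PySem.Dict.keys_empty, hprs, List.map_map]
    rfl
  rw [hkeys]
  apply List.map_congr_left
  intro k _
  refine congrArg (fun v => (k.1, k.2, v)) ?_
  rw [hgA, PySem.Dict.getD_foldl_modify_append prs PySem.Dict.empty k, hprs,
    PySem.Dict.getD_empty, List.nil_append, pv_gather plan k.1 k.2]
  rw [List.filter_map, List.map_map]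
  obtain ⟨a, b⟩ := k
  rfl
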